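-- pv_equiv track=rewrite | github.com/HakoNguyen/distracted_math | 6.py | count_integers_not_divisible
-- ===== SOURCE A (Python) =====
-- from itertools import combinations
-- from math import gcd
-- from functools import reduce
--
-- def lcm(a, b):
--     return a * b // gcd(a, b)
--
-- def count_integers_not_divisible(n, primes):
--     k = len(primes)
--     result = 0
--     for i in range(1, k + 1):
--         for comb in combinations(primes, i):
--             l = reduce(lcm, comb, 1)
--             if i % 2 == 1:
--                 result += n // l
--             else:
--                 result -= n // l
--     return n - result
-- ===== SOURCE B (Python) =====
-- from math import gcd
--
-- def count_integers_not_divisible(n, primes):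
--     # incremental inclusion-exclusion: one pass over primes, doubling the
--     # list of (lcm, sign) subset terms; the empty subset contributes +n
--     terms = [(1, 1)]
--     for p in primes:
--         terms = terms + [(l * p // gcd(l, p), -s) for (l, s) in terms]
--     return sum(s * (n // l) for (l, s) in terms)
-- ===== Notes on version B (the rewrite author's own statement) =====
-- stated objective: simpler
-- what changed: Replaces the size-indexed enumeration of combinations with per-subset reduce(lcm), parity branch and final complement by a single pass over the primes that doubles a list of (lcm, sign) terms and returns the signed sum directly (the empty subset supplies the +n).
import Mathlib
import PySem

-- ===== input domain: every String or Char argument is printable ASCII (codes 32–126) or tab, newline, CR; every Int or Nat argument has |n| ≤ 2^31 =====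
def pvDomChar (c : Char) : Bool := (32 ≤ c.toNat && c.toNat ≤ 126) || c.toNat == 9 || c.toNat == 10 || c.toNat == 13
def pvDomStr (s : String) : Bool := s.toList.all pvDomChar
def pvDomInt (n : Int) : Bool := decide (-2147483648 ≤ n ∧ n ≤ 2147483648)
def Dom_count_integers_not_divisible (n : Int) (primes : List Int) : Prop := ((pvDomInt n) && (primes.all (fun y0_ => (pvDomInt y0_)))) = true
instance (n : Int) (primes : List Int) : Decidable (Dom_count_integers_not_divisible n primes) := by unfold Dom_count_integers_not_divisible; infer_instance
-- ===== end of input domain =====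

-- B replaces the combinations/reduce/parity-branch enumeration by one pass doubling a
-- (lcm, sign) term list and summing the signed quotients directly (objective: simpler).

-- ===== PORT A =====
-- helper lcm(a, b) = a * b // gcd(a, b)  (math.gcd is the nonnegative gcd = Int.gcd)
def pylcm (a b : Int) : Int := PySem.Int.floordiv (a * b) ((Int.gcd a b : Nat) : Int)

-- itertools.combinations(xs, i) in its exact order (lexicographic by position)
def combos : Nat → List Int → List (List Int)
  | 0, _ => [[]]
  | _ + 1, [] => []
  | i + 1, x :: xs => (combos i xs).map (fun c => x :: c) ++ combos (i + 1) xs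

def count_integers_not_divisible (n : Int) (primes : List Int) : Int :=
  let k := primes.length
  let result := (PySem.List.pyRange 1 ((k : Int) + 1) 1).foldl (fun result i =>
    (combos i.toNat primes).foldl (fun result comb =>
      let l := comb.foldl pylcm 1   -- reduce(lcm, comb, 1)
      if PySem.Int.mod i 2 == 1 then result + PySem.Int.floordiv n l
      else result - PySem.Int.floordiv n l) result) 0
  n - result

-- ===== PORT B =====
def count_integers_not_divisible_alt (n : Int) (primes : List Int) : Int :=
  let terms := primes.foldl
    (fun terms p => terms ++ terms.map (fun ls => (pylcm ls.1 p, -ls.2)))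
    [((1 : Int), (1 : Int))]
  (terms.map (fun ls => ls.2 * PySem.Int.floordiv n ls.1)).sum

-- ===== PRECONDITION & SPEC =====
-- Pre_ excludes 0 ∈ primes: there Python A raises ZeroDivisionError (n // 0 on the
-- singleton combination (0,)); B raises the same exception there.
def Pre_count_integers_not_divisible (n : Int) (primes : List Int) : Prop := (0 : Int) ∉ primes
instance (n : Int) (primes : List Int) : Decidable (Pre_count_integers_not_divisible n primes) := by unfold Pre_count_integers_not_divisible; infer_instance

def pvWitness_count_integers_not_divisible : Int × List Int := (10, [2, 3])

def Spec_count_integers_not_divisible (n : Int) (primes : List Int) (out : Int) : Prop := out = count_integers_not_divisible_alt n primes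
instance (n : Int) (primes : List Int) (out : Int) : Decidable (Spec_count_integers_not_divisible n primes out) := by unfold Spec_count_integers_not_divisible; infer_instance

-- ===== CLAIM (what is proved, stated in full; the proofs are below) =====
def Claim_equal_count_integers_not_divisible : Prop := ∀ (n : Int) (primes : List Int), Dom_count_integers_not_divisible n primes → Pre_count_integers_not_divisible n primes → Spec_count_integers_not_divisible n primes (count_integers_not_divisible n primes)

-- ===== LEMMAS AND PROOFS =====

-- sum of n // lcm over a list of combinations, lcm-fold started at l
def gsum (n l : Int) (cs : List (List Int)) : Int :=
  (cs.map (fun c => PySem.Int.floordiv n (c.foldl pylcm l))).sum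

-- the inclusion-exclusion value both programs compute, in B's recursive shape
def Fsum (n l : Int) : List Int → Int
  | [] => PySem.Int.floordiv n l
  | p :: ps => Fsum n l ps - Fsum n (pylcm l p) ps

-- the same value in A's shape: alternating sum over combination sizes
def Ssum (n l : Int) (ps : List Int) : Int :=
  ((List.range (ps.length + 1)).map (fun i => (-1 : Int) ^ i * gsum n l (combos i ps))).sum

lemma combos_succ_cons (i : Nat) (x : Int) (xs : List Int) :
    combos (i + 1) (x :: xs) = (combos i xs).map (fun c => x :: c) ++ combos (i + 1) xs := rfl

lemma combos_nil_of_gt : ∀ (ps : List Int) (i : Nat), ps.length < i → combos i ps = [] := by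
  intro ps
  induction ps with
  | nil =>
    intro i h
    cases i with
    | zero => omega
    | succ j => rfl
  | cons x xs ih =>
    intro i h
    cases i with
    | zero => omega
    | succ j =>
      rw [combos_succ_cons, ih j (by simp at h; omega), ih (j + 1) (by simp at h; omega)]
      simp

lemma gsum_append (n l : Int) (cs ds : List (List Int)) :
    gsum n l (cs ++ ds) = gsum n l cs + gsum n l ds := by
  simp [gsum]

lemma gsum_map_cons (n l p : Int) (cs : List (List Int)) :
    gsum n l (cs.map (fun c => p :: c)) = gsum n (pylcm l p) cs := by
  simp [gsum, List.map_map, Function.comp_def]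

lemma sum_map_sub_int {α : Type} (f g : α → Int) (xs : List α) :
    (xs.map fun x => f x - g x).sum = (xs.map f).sum - (xs.map g).sum := by
  induction xs with
  | nil => simp
  | cons a t ih => simp [ih]; ring

lemma sum_map_neg_int {α : Type} (f : α → Int) (xs : List α) :
    (xs.map fun x => -f x).sum = -(xs.map f).sum := by
  induction xs with
  | nil => simp
  | cons a t ih => simp [ih]; ring

lemma Ssum_nil (n l : Int) : Ssum n l [] = PySem.Int.floordiv n l := by
  simp [Ssum, gsum, combos]

-- peel the empty-subset term off Ssum
lemma Ssum_peel (n l : Int) (ps : List Int) :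
    Ssum n l ps = PySem.Int.floordiv n l
      + ((List.range ps.length).map
          (fun i => (-1 : Int) ^ (i + 1) * gsum n l (combos (i + 1) ps))).sum := by
  unfold Ssum
  rw [List.range_succ_eq_map, List.map_cons, List.sum_cons, List.map_map]
  simp [Function.comp_def, gsum, combos]

lemma Ssum_cons (n l p : Int) (ps : List Int) :
    Ssum n l (p :: ps) = Ssum n l ps - Ssum n (pylcm l p) ps := by
  have hL : Ssum n l (p :: ps)
      = (-1 : Int) ^ 0 * gsum n l (combos 0 (p :: ps))
        + ((List.range (ps.length + 1)).map
            ((fun i => (-1 : Int) ^ i * gsum n l (combos i (p :: ps))) ∘ Nat.succ)).sum := by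
    unfold Ssum
    simp only [List.length_cons]
    rw [List.range_succ_eq_map, List.map_cons, List.sum_cons, List.map_map]
  rw [hL]
  have hstep : ∀ i : Nat,
      ((fun i => (-1 : Int) ^ i * gsum n l (combos i (p :: ps))) ∘ Nat.succ) i
        = ((-1 : Int) ^ (i + 1) * gsum n l (combos (i + 1) ps))
          - ((-1 : Int) ^ i * gsum n (pylcm l p) (combos i ps)) := by
    intro i
    simp only [Function.comp_apply, Nat.succ_eq_add_one, combos_succ_cons, gsum_append,
      gsum_map_cons, pow_succ]
    ring
  rw [List.map_congr_left (fun i _ => hstep i), sum_map_sub_int]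
  rw [Ssum_peel n l ps]
  have hS2 : ((List.range (ps.length + 1)).map
      (fun i => (-1 : Int) ^ (i + 1) * gsum n l (combos (i + 1) ps))).sum
      = ((List.range ps.length).map
          (fun i => (-1 : Int) ^ (i + 1) * gsum n l (combos (i + 1) ps))).sum := by
    rw [List.range_succ, List.map_append, List.sum_append]
    simp [gsum, combos_nil_of_gt ps (ps.length + 1) (by omega)]
  rw [hS2]
  have hfirst : ((List.range (ps.length + 1)).map
          (fun i => (-1 : Int) ^ i * gsum n (pylcm l p) (combos i ps))).sum
      = Ssum n (pylcm l p) ps := rfl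
  rw [hfirst]
  have h0 : gsum n l (combos 0 (p :: ps)) = PySem.Int.floordiv n l := by
    simp [gsum, combos]
  rw [h0]
  ring

lemma Fsum_eq_Ssum (n : Int) : ∀ (ps : List Int) (l : Int), Fsum n l ps = Ssum n l ps := by
  intro ps
  induction ps with
  | nil => intro l; rw [Ssum_nil]; rfl
  | cons p t ih =>
    intro l
    rw [Ssum_cons, ← ih, ← ih]
    rfl

lemma foldl_pm {α : Type} (c : Bool) (h : α → Int) (cs : List α) :
    ∀ r : Int, cs.foldl (fun r x => if c then r + h x else r - h x) r
      = r + (if c then 1 else -1) * (cs.map h).sum := by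
  induction cs with
  | nil => intro r; simp
  | cons a t ih =>
    intro r
    rw [List.foldl_cons, ih]
    cases c <;> simp <;> ring

lemma sign_lemma (j : Nat) :
    (if PySem.Int.mod (1 + (j : Int)) 2 == 1 then (1 : Int) else -1) = (-1 : Int) ^ j := by
  rw [PySem.Int.mod_eq_emod_of_pos (show (0 : Int) < 2 by omega)]
  rcases Nat.even_or_odd j with hj | hj
  · obtain ⟨m, hm⟩ := hj
    have h2 : (1 + (j : Int)) % 2 = 1 := by omega
    simp [h2, Even.neg_one_pow (⟨m, by omega⟩ : Even j)]
  · obtain ⟨m, hm⟩ := hj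
    have h2 : (1 + (j : Int)) % 2 = 0 := by omega
    simp [h2, Odd.neg_one_pow (⟨m, by omega⟩ : Odd j)]

lemma A_eq_Ssum (n : Int) (ps : List Int) :
    count_integers_not_divisible n ps = Ssum n 1 ps := by
  simp only [count_integers_not_divisible]
  rw [PySem.List.pyRange_one]
  have hk : (((ps.length : Int) + 1) - 1).toNat = ps.length := by omega
  rw [hk, List.foldl_map]
  have hcongr : ∀ (r : Int), ∀ j ∈ List.range ps.length,
      (combos (1 + (j : Int)).toNat ps).foldl (fun result comb =>
        if PySem.Int.mod (1 + (j : Int)) 2 == 1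
        then result + PySem.Int.floordiv n (comb.foldl pylcm 1)
        else result - PySem.Int.floordiv n (comb.foldl pylcm 1)) r
      = r + (-1 : Int) ^ j * gsum n 1 (combos (j + 1) ps) := by
    intro r j _
    rw [foldl_pm (PySem.Int.mod (1 + (j : Int)) 2 == 1)
        (fun comb : List Int => PySem.Int.floordiv n (List.foldl pylcm 1 comb))
        (combos (1 + (j : Int)).toNat ps) r, sign_lemma]
    have ht : (1 + (j : Int)).toNat = j + 1 := by omega
    rw [ht]
    rfl
  rw [PySem.List.foldl_congr_mem _ _
    (fun r j => r + (-1 : Int) ^ j * gsum n 1 (combos (j + 1) ps)) 0 hcongr]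
  rw [PySem.List.foldl_add _ (fun j => (-1 : Int) ^ j * gsum n 1 (combos (j + 1) ps)) 0]
  rw [Ssum_peel]
  have h1 : PySem.Int.floordiv n 1 = n := by
    rw [PySem.Int.floordiv_eq_ediv_of_pos (show (0 : Int) < 1 by omega), Int.ediv_one]
  rw [h1]
  have hneg : ((List.range ps.length).map
      (fun i => (-1 : Int) ^ (i + 1) * gsum n 1 (combos (i + 1) ps))).sum
      = -((List.range ps.length).map
          (fun i => (-1 : Int) ^ i * gsum n 1 (combos (i + 1) ps))).sum := by
    rw [← sum_map_neg_int (fun i => (-1 : Int) ^ i * gsum n 1 (combos (i + 1) ps))]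
    apply congrArg
    apply List.map_congr_left
    intro i _
    rw [pow_succ]
    ring
  rw [hneg]
  ring

lemma B_inv (n : Int) : ∀ (ps : List Int) (acc : List (Int × Int)),
    ((ps.foldl (fun terms p => terms ++ terms.map (fun ls => (pylcm ls.1 p, -ls.2))) acc).map
      (fun ls => ls.2 * PySem.Int.floordiv n ls.1)).sum
    = (acc.map (fun ls => ls.2 * Fsum n ls.1 ps)).sum := by
  intro ps
  induction ps with
  | nil => intro acc; simp [Fsum]
  | cons p t ih =>
    intro acc
    rw [List.foldl_cons, ih]
    rw [List.map_append, List.sum_append, List.map_map]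
    have hflip : ∀ ls : Int × Int,
        ((fun ls : Int × Int => ls.2 * Fsum n ls.1 t) ∘ fun ls : Int × Int => (pylcm ls.1 p, -ls.2)) ls
          = -(ls.2 * Fsum n (pylcm ls.1 p) t) := by
      intro ls
      simp [mul_comm]
    rw [List.map_congr_left (fun ls _ => hflip ls),
      sum_map_neg_int (fun ls : Int × Int => ls.2 * Fsum n (pylcm ls.1 p) t)]
    have hcons : ∀ ls : Int × Int,
        (fun ls : Int × Int => ls.2 * Fsum n ls.1 (p :: t)) ls
          = (fun ls : Int × Int => ls.2 * Fsum n ls.1 t - ls.2 * Fsum n (pylcm ls.1 p) t) ls := by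
      intro ls
      simp only [Fsum]
      ring
    rw [List.map_congr_left (fun ls _ => hcons ls),
      sum_map_sub_int (fun ls : Int × Int => ls.2 * Fsum n ls.1 t)
        (fun ls : Int × Int => ls.2 * Fsum n (pylcm ls.1 p) t)]
    ring

lemma B_eq_Fsum (n : Int) (ps : List Int) :
    count_integers_not_divisible_alt n ps = Fsum n 1 ps := by
  simp only [count_integers_not_divisible_alt]
  rw [B_inv]
  simp

-- ===== VERDICT (by name: the statement is the Claim_ definition above) =====
theorem count_integers_not_divisible_spec : Claim_equal_count_integers_not_divisible := by
  intro n primes _ _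
  unfold Spec_count_integers_not_divisible
  rw [A_eq_Ssum, B_eq_Fsum, Fsum_eq_Ssum]
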